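-- pv_equiv track=rewrite | github.com/DmytroBabenko/insights-from-user-reviews | collocations/noun_collocation_extractor.py | __tokenize_sent_by_coma
-- ===== SOURCE A (Python) =====
-- def __tokenize_sent_by_coma(sent_info):
--     result, sub_sent = [], []
--     for token in sent_info:
--         if 'upos' in token and token['upos'] == 'PUNCT':
--             if sub_sent.count('(') != sub_sent.count(')'):
--                 continue
--
--             if 'NOUN' in [token['upos'] for token in sub_sent if 'upos' in token]:
--                 result.append(sub_sent)
--                 sub_sent = []
--                 continue
--
--         sub_sent.append(token)
--
--     if len(sub_sent) > 0:
--         result.append(sub_sent)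
--
--     return result
-- ===== SOURCE B (Python) =====
-- def __tokenize_sent_by_coma(sent_info):
--     # Index-based split-point scan: repeatedly locate the next qualifying PUNCT
--     # (a PUNCT preceded by a NOUN within the current chunk) and slice the chunk out,
--     # instead of A's token-by-token accumulation with per-PUNCT rescans of sub_sent.
--     # (A's sub_sent.count('(') compares dict tokens to a string, so it is always 0==0.)
--     def _next_split(start):
--         seen_noun = False
--         for i in range(start, len(sent_info)):
--             u = sent_info[i].get('upos')
--             if u == 'PUNCT' and seen_noun:
--                 return i
--             seen_noun = seen_noun or u == 'NOUN'
--         return None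
--
--     result, start = [], 0
--     while True:
--         i = _next_split(start)
--         if i is None:
--             break
--         result.append(sent_info[start:i])
--         start = i + 1
--     rest = sent_info[start:]
--     if rest:
--         result.append(rest)
--     return result
-- ===== Notes on version B (the rewrite author's own statement) =====
-- stated objective: alternative
-- what changed: B replaces A's token-by-token accumulation (which rescans sub_sent with two count() passes and an upos comprehension at every PUNCT) by an index-based split-point algorithm: a while loop repeatedly finds the next PUNCT preceded by a NOUN in the current chunk and slices the chunk out; A's paren-balance test compares dict tokens to the string '(' so it is always 0==0 and disappears.
import Mathlib
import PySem

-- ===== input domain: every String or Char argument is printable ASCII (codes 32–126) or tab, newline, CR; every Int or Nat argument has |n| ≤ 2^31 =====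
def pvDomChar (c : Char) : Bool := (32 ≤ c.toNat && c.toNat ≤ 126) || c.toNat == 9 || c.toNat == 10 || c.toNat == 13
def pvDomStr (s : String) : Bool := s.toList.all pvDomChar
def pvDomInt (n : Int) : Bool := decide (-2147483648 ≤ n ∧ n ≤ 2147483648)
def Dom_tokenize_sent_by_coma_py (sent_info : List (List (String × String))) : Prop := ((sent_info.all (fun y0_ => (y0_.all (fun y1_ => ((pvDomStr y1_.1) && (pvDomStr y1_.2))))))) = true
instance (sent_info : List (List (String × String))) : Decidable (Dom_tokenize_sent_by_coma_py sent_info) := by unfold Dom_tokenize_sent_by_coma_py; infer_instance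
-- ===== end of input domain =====

-- B replaces A's token-by-token accumulation (with per-PUNCT rescans of sub_sent) by an
-- index-based split-point scan that slices chunks out (objective: alternative algorithm).


-- ===== PORT A =====
-- A's loop body; tokens are dicts (association lists), so A's sub_sent.count('(') compares a
-- dict to the string '(' — always False in Python — ported exactly as countP (fun _ => false).
def pvStepA (st : List (List (List (String × String))) × List (List (String × String)))
    (token : List (String × String)) :
    List (List (List (String × String))) × List (List (String × String)) :=
  let result := st.1
  let sub_sent := st.2
  if (PySem.Dict.mk token).contains "upos" && ((PySem.Dict.mk token).get? "upos" == some "PUNCT") then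
    if sub_sent.countP (fun _ => false) ≠ sub_sent.countP (fun _ => false) then
      (result, sub_sent)  -- continue
    else if "NOUN" ∈ sub_sent.filterMap (fun t => (PySem.Dict.mk t).get? "upos") then
      (result ++ [sub_sent], [])
    else
      (result, sub_sent ++ [token])
  else
    (result, sub_sent ++ [token])

def tokenize_sent_by_coma_py (sent_info : List (List (String × String))) : List (List (List (String × String))) :=
  let st := sent_info.foldl pvStepA ([], [])
  if st.2.length > 0 then st.1 ++ [st.2] else st.1

-- ===== PORT B =====
-- token.get('upos')
def pvUpos (t : List (String × String)) : Option String := (PySem.Dict.mk t).get? "upos"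

-- Source B's _next_split, on the suffix starting at the current index: the offset of the first
-- PUNCT token preceded (within the suffix) by a NOUN, or none.
def pvNextSplit (seen_noun : Bool) : List (List (String × String)) → Option Nat
  | [] => none
  | t :: rest =>
      if (pvUpos t == some "PUNCT") && seen_noun then some 0
      else (pvNextSplit (seen_noun || (pvUpos t == some "NOUN")) rest).map (· + 1)

theorem pvNextSplit_lt (seen : Bool) (l : List (List (String × String))) (i : Nat)
    (h : pvNextSplit seen l = some i) : i < l.length := by
  induction l generalizing seen i with
  | nil => simp [pvNextSplit] at h
  | cons t rest ih =>
      simp only [pvNextSplit] at h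
      split at h
      · simp at h; subst h; simp
      · cases hj : pvNextSplit (seen || (pvUpos t == some "NOUN")) rest with
        | none => simp [hj] at h
        | some j =>
            simp [hj] at h
            have := ih _ _ hj
            simp [← h]; omega

-- Source B's while-loop over split points: slice out the chunk, continue after the PUNCT;
-- the non-empty remainder is appended at the end.
def tokenize_sent_by_coma_py_alt (sent_info : List (List (String × String))) : List (List (List (String × String))) :=
  match h : pvNextSplit false sent_info with
  | some i => sent_info.take i :: tokenize_sent_by_coma_py_alt (sent_info.drop (i + 1))
  | none => if sent_info.isEmpty then [] else [sent_info]
termination_by sent_info.length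
decreasing_by
  have := pvNextSplit_lt false sent_info i h
  simp [List.length_drop]; omega

-- ===== PRECONDITION & SPEC =====
def Spec_tokenize_sent_by_coma_py (sent_info : List (List (String × String))) (out : List (List (List (String × String)))) : Prop := out = tokenize_sent_by_coma_py_alt sent_info
instance (sent_info : List (List (String × String))) (out : List (List (List (String × String)))) : Decidable (Spec_tokenize_sent_by_coma_py sent_info out) := by unfold Spec_tokenize_sent_by_coma_py; infer_instance

-- ===== CLAIM (what is proved, stated in full; the proofs are below) =====
def Claim_equal_tokenize_sent_by_coma_py : Prop := ∀ (sent_info : List (List (String × String))), Dom_tokenize_sent_by_coma_py sent_info → Spec_tokenize_sent_by_coma_py sent_info (tokenize_sent_by_coma_py sent_info)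

-- ===== LEMMAS AND PROOFS =====
-- "NOUN" occurs among the upos values of the chunk accumulated so far.
def pvHasNoun (sub_sent : List (List (String × String))) : Bool :=
  decide ("NOUN" ∈ sub_sent.filterMap (fun t => (PySem.Dict.mk t).get? "upos"))

theorem pvHasNoun_append (sub : List (List (String × String))) (t : List (String × String)) :
    pvHasNoun (sub ++ [t]) = (pvHasNoun sub || (pvUpos t == some "NOUN")) := by
  simp only [pvHasNoun, pvUpos, List.filterMap_append]
  cases h : (PySem.Dict.mk t).get? "upos" with
  | none => simp [h]
  | some u =>
      by_cases hu : u = "NOUN"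
      · subst hu; simp [h]
      · simp [h, hu, Ne.symm hu]

-- Reference recursion: the chunks produced from a partially accumulated chunk `sub`.
def pvSplitFrom (sub : List (List (String × String))) :
    List (List (String × String)) → List (List (List (String × String)))
  | [] => if sub.isEmpty then [] else [sub]
  | t :: rest =>
      if (pvUpos t == some "PUNCT") && pvHasNoun sub then sub :: pvSplitFrom [] rest
      else pvSplitFrom (sub ++ [t]) rest

-- A's fold equals the reference recursion.
theorem pvA_eq_splitFrom (l : List (List (String × String)))
    (result : List (List (List (String × String)))) (sub : List (List (String × String))) :
    (let st := l.foldl pvStepA (result, sub);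
     if st.2.length > 0 then st.1 ++ [st.2] else st.1) = result ++ pvSplitFrom sub l := by
  induction l generalizing result sub with
  | nil =>
      cases sub <;> simp [pvSplitFrom]
  | cons t rest ih =>
      simp only [List.foldl_cons, pvSplitFrom]
      by_cases hp : (pvUpos t == some "PUNCT") = true
      · have hc : (PySem.Dict.mk t).contains "upos" = true := by
          simp only [pvUpos] at hp
          simp [PySem.Dict.contains_eq_isSome_get?]
          cases h : (PySem.Dict.mk t).get? "upos" <;> simp [h] at hp ⊢
        cases hn : pvHasNoun sub with
        | true =>
            have hm : "NOUN" ∈ sub.filterMap (fun t => (PySem.Dict.mk t).get? "upos") := by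
              simpa [pvHasNoun] using hn
            simp only [pvStepA, pvUpos] at *
            simp [hp, hc, hm, ih]
        | false =>
            have hm : "NOUN" ∉ sub.filterMap (fun t => (PySem.Dict.mk t).get? "upos") := by
              simpa [pvHasNoun] using hn
            simp only [pvStepA, pvUpos] at *
            simp [hp, hc, hm, ih]
      · simp only [pvStepA, pvUpos] at *
        simp only [hp, Bool.false_and, Bool.and_false]
        simp [ih]
  -- note: the countP ≠ countP branch of pvStepA is definitionally never taken (simp closes it)

-- B's split search characterises the reference recursion: no split point left.
theorem pvSplitFrom_none (l : List (List (String × String))) (sub : List (List (String × String)))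
    (h : pvNextSplit (pvHasNoun sub) l = none) :
    pvSplitFrom sub l = if (sub ++ l).isEmpty then [] else [sub ++ l] := by
  induction l generalizing sub with
  | nil => simp [pvSplitFrom]
  | cons t rest ih =>
      simp only [pvNextSplit] at h
      split at h
      · simp at h
      · rename_i hcond
        cases hj : pvNextSplit (pvHasNoun sub || (pvUpos t == some "NOUN")) rest with
        | some j => simp [hj] at h
        | none =>
            rw [← pvHasNoun_append] at hj
            have hcf : ((pvUpos t == some "PUNCT") && pvHasNoun sub) = false := by
              revert hcond; cases (pvUpos t == some "PUNCT") <;> cases pvHasNoun sub <;> simp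
            simp only [pvSplitFrom, hcf, Bool.false_eq_true, if_false]
            rw [ih _ hj]
            simp

-- …and: a split point at offset i.
theorem pvSplitFrom_some (l : List (List (String × String))) (sub : List (List (String × String))) (i : Nat)
    (h : pvNextSplit (pvHasNoun sub) l = some i) :
    pvSplitFrom sub l = (sub ++ l.take i) :: pvSplitFrom [] (l.drop (i + 1)) := by
  induction l generalizing sub i with
  | nil => simp [pvNextSplit] at h
  | cons t rest ih =>
      simp only [pvNextSplit] at h
      split at h
      · rename_i hcond
        have hi : i = 0 := by simpa using h.symm
        subst hi
        simp only [pvSplitFrom, hcond]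
        simp
      · rename_i hcond
        cases hj : pvNextSplit (pvHasNoun sub || (pvUpos t == some "NOUN")) rest with
        | none => simp [hj] at h
        | some j =>
            simp only [hj, Option.map_some] at h
            obtain rfl : i = j + 1 := by simpa using h.symm
            rw [← pvHasNoun_append] at hj
            have hcf : ((pvUpos t == some "PUNCT") && pvHasNoun sub) = false := by
              revert hcond; cases (pvUpos t == some "PUNCT") <;> cases pvHasNoun sub <;> simp
            simp only [pvSplitFrom, hcf, Bool.false_eq_true, if_false]
            rw [ih _ _ hj]
            simp

-- B's loop equals the reference recursion started on an empty chunk.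
theorem pvAlt_eq_splitFrom : ∀ (n : Nat) (l : List (List (String × String))), l.length ≤ n →
    tokenize_sent_by_coma_py_alt l = pvSplitFrom [] l := by
  intro n
  induction n with
  | zero =>
      intro l hl
      have : l = [] := by cases l <;> simp_all
      subst this
      rw [tokenize_sent_by_coma_py_alt]
      simp [pvNextSplit, pvSplitFrom]
  | succ n ih =>
      intro l hl
      rw [tokenize_sent_by_coma_py_alt]
      split
      · rename_i i h
        have h' : pvNextSplit (pvHasNoun []) l = some i := by simpa [pvHasNoun] using h
        rw [pvSplitFrom_some l [] i h']
        have hlt := pvNextSplit_lt false l i h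
        rw [ih (l.drop (i + 1)) (by simp [List.length_drop]; omega)]
        simp
      · rename_i h
        have h' : pvNextSplit (pvHasNoun []) l = none := by simpa [pvHasNoun] using h
        rw [pvSplitFrom_none l [] h']
        simp

-- ===== VERDICT (by name: the statement is the Claim_ definition above) =====
theorem tokenize_sent_by_coma_py_spec : Claim_equal_tokenize_sent_by_coma_py := by
  intro sent_info _
  unfold Spec_tokenize_sent_by_coma_py
  rw [pvAlt_eq_splitFrom sent_info.length sent_info le_rfl]
  simpa using pvA_eq_splitFrom sent_info [] []
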